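-- pv_equiv track=rewrite | github.com/Julius0014/Artificial_Intelligence | Sudoku/sc2.py | findpossible
-- ===== SOURCE A (Python) =====
-- def findpossible(cell):
--    possible = [1,2,3,4,5,6,7,8,9]
--    for i in range(9):
--         for row in cell:
--             for d in row:
--                 if d == str(i + 1):
--                    possible.remove(i + 1)
--    return possible
-- ===== SOURCE B (Python) =====
-- def findpossible(cell):
--     possible = [1, 2, 3, 4, 5, 6, 7, 8, 9]
--     for row in cell:
--         for d in row:
--             if d in ("1", "2", "3", "4", "5", "6", "7", "8", "9"):
--                 possible.remove(int(d))
--     return possible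
-- ===== Notes on version B (the rewrite author's own statement) =====
-- stated objective: faster
-- what changed: B makes a single pass over the grid, removing int(d) from the candidate list whenever d is a digit character, instead of A's nine full scans of the grid (one per digit).
import Mathlib
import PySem

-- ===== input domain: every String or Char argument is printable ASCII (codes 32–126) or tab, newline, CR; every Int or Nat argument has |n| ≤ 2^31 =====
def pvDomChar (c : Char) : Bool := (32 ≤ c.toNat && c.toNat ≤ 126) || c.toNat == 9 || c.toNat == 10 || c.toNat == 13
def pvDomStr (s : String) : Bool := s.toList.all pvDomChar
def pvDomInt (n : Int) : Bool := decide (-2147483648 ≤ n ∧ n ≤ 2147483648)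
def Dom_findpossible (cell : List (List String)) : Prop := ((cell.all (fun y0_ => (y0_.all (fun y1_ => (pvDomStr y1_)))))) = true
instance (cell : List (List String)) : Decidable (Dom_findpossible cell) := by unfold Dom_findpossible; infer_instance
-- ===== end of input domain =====

-- B replaces A's nine full scans of the grid (one per digit) by a single pass that
-- removes int(d) from the candidate list whenever d is a digit character ("faster": constant factor).

-- ===== PORT A =====
def findpossible (cell : List (List String)) : List Int :=
  ((PySem.List.pyRange 0 9 1).foldl (fun st i =>
      cell.foldl (fun st row =>
        row.foldl (fun st d =>
          if d == PySem.Int.toStr (i + 1) then st.bind (fun p => PySem.List.remove? p (i + 1)) else st)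
        st) st)
    (some ([1,2,3,4,5,6,7,8,9] : List Int))).getD []

-- ===== PORT B =====
def findpossible_alt (cell : List (List String)) : List Int :=
  (cell.foldl (fun st row =>
      row.foldl (fun st d =>
        if (["1","2","3","4","5","6","7","8","9"] : List String).contains d then
          st.bind (fun p => (PySem.Int.ofStr? d).bind (fun n => PySem.List.remove? p n))
        else st) st)
    (some ([1,2,3,4,5,6,7,8,9] : List Int))).getD []

-- ===== PRECONDITION & SPEC =====
-- Pre_ excludes grids in which some digit string "1".."9" occurs more than once:
-- there the second `list.remove` raises ValueError in A (and in B as well).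
def Pre_findpossible (cell : List (List String)) : Prop :=
  ∀ s ∈ (["1","2","3","4","5","6","7","8","9"] : List String), cell.flatten.count s ≤ 1
instance (cell : List (List String)) : Decidable (Pre_findpossible cell) := by
  unfold Pre_findpossible; infer_instance
def pvWitness_findpossible : List (List String) := [["5", "x", ""], [" 7 ", "1"]]
def Spec_findpossible (cell : List (List String)) (out : List Int) : Prop := out = findpossible_alt cell
instance (cell : List (List String)) (out : List Int) : Decidable (Spec_findpossible cell out) := by unfold Spec_findpossible; infer_instance

-- ===== CLAIM (what is proved, stated in full; the proofs are below) =====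
def Claim_equal_findpossible : Prop := ∀ (cell : List (List String)), Dom_findpossible cell → Pre_findpossible cell → Spec_findpossible cell (findpossible cell)

-- ===== LEMMAS AND PROOFS =====

def pvRemStep (st : Option (List Int)) (n : Int) : Option (List Int) :=
  st.bind (fun p => PySem.List.remove? p n)

def pvDval (d : String) : Option Int :=
  if d = "1" then some 1 else if d = "2" then some 2 else if d = "3" then some 3 else
  if d = "4" then some 4 else if d = "5" then some 5 else if d = "6" then some 6 else
  if d = "7" then some 7 else if d = "8" then some 8 else if d = "9" then some 9 else none

theorem pv_foldl_dval :
    ∀ (l : List String) (st : Option (List Int)),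
      l.foldl (fun st d => match pvDval d with | some n => pvRemStep st n | none => st) st
        = (l.filterMap pvDval).foldl pvRemStep st := by
  intro l
  induction l with
  | nil => intro st; rfl
  | cons d tl ih =>
    intro st
    cases h : pvDval d <;> simp [h, ih]

theorem pv_dval_mem {d : String} {a : Int} (h : pvDval d = some a) :
    a ∈ ([1,2,3,4,5,6,7,8,9] : List Int) := by
  unfold pvDval at h
  split_ifs at h <;> simp_all

theorem pv_dval_eq_some {a : Int} (ha : a ∈ ([1,2,3,4,5,6,7,8,9] : List Int)) (d : String) :
    pvDval d = some a ↔ d = PySem.Int.toStr a := by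
  constructor
  · intro h
    unfold pvDval at h
    split_ifs at h <;> (injection h with h2; subst h2; subst_vars; decide)
  · intro h
    subst h
    fin_cases ha <;> decide

theorem pv_inner (s : String) (n : Int) :
    ∀ (xs : List String), xs.count s ≤ 1 → ∀ st : Option (List Int),
      xs.foldl (fun st d => if d == s then st.bind (fun p => PySem.List.remove? p n) else st) st
        = if xs.contains s then st.bind (fun p => PySem.List.remove? p n) else st := by
  intro xs
  induction xs with
  | nil => intro _ st; simp
  | cons d tl ih =>
    intro h st
    rw [List.count_cons] at h
    by_cases hd : d = s
    · subst hd
      have htl0 : tl.count d = 0 := by simp at h; omega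
      have hnm : d ∉ tl := List.count_eq_zero.1 htl0
      have htl : tl.count d ≤ 1 := by omega
      rw [List.foldl_cons, if_pos (by simp : (d == d) = true), ih htl _]
      simp [List.contains_eq_mem, hnm]
    · rw [List.foldl_cons, if_neg (by simp [hd] : ¬ ((d == s) = true)), ih (by omega) st]
      simp [List.contains_eq_mem, Ne.symm hd]

theorem pv_condA (xs : List String) :
    ∀ (ns : List Int) (st : Option (List Int)),
      ns.foldl (fun st i => if xs.contains (PySem.Int.toStr (i + 1)) then pvRemStep st (i + 1) else st) st
        = ((ns.map (fun i => i + 1)).filter (fun n => xs.contains (PySem.Int.toStr n))).foldl pvRemStep st := by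
  intro ns
  induction ns with
  | nil => intro st; rfl
  | cons i tl ih =>
    intro st
    rw [List.foldl_cons, List.map_cons, List.filter_cons]
    by_cases hc : xs.contains (PySem.Int.toStr (i + 1)) = true
    · rw [if_pos hc, if_pos hc, List.foldl_cons, ih]
    · rw [if_neg hc, if_neg hc, ih]

theorem pv_removeChain :
    ∀ (ds p : List Int), p.Nodup → ds.Nodup → (∀ n ∈ ds, n ∈ p) →
      ds.foldl pvRemStep (some p) = some (p.filter (fun a => !ds.contains a)) := by
  intro ds
  induction ds with
  | nil => intro p _ _ _; simp
  | cons n tl ih =>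
    intro p hp hd hsub
    have hnp : n ∈ p := hsub n List.mem_cons_self
    have hstep : pvRemStep (some p) n = some (p.erase n) := by
      simp [pvRemStep, PySem.List.remove?_eq_some_erase p n hnp]
    have hp' : (p.erase n).Nodup := hp.erase n
    have hd' : tl.Nodup := (List.nodup_cons.1 hd).2
    have hn : n ∉ tl := (List.nodup_cons.1 hd).1
    have hsub' : ∀ m ∈ tl, m ∈ p.erase n := by
      intro m hm
      exact List.mem_erase_of_ne (by rintro rfl; exact hn hm) |>.2 (hsub m (List.mem_cons_of_mem _ hm))
    calc (n :: tl).foldl pvRemStep (some p)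
        = tl.foldl pvRemStep (some (p.erase n)) := by simp [List.foldl_cons, hstep]
      _ = some ((p.erase n).filter (fun a => !tl.contains a)) := ih (p.erase n) hp' hd' hsub'
      _ = some (p.filter (fun a => !(n :: tl).contains a)) := by
          rw [hp.erase_eq_filter n, List.filter_filter]
          congr 1
          apply List.filter_congr
          intro a _
          by_cases h1 : a = n <;> simp [h1]

theorem pv_count_filterMap {a : Int} (ha : a ∈ ([1,2,3,4,5,6,7,8,9] : List Int)) :
    ∀ xs : List String, (xs.filterMap pvDval).count a = xs.count (PySem.Int.toStr a) := by
  intro xs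
  induction xs with
  | nil => rfl
  | cons d tl ih =>
    cases h : pvDval d with
    | none =>
      have hne : d ≠ PySem.Int.toStr a := by
        intro hd
        rw [(pv_dval_eq_some ha d).2 hd] at h
        exact Option.some_ne_none a h
      simp [h, ih, hne]
    | some b =>
      have hba : (b = a) ↔ (d = PySem.Int.toStr a) := by
        constructor
        · rintro rfl; exact (pv_dval_eq_some ha d).1 h
        · intro hd
          have h2 := (pv_dval_eq_some ha d).2 hd
          rw [h] at h2
          exact Option.some.inj h2
      by_cases hb : b = a
      · have hd2 : d = PySem.Int.toStr a := hba.1 hb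
        subst hd2
        rw [List.filterMap_cons, h]
        simp [ih, hb]
      · have hne : d ≠ PySem.Int.toStr a := fun hd => hb (hba.2 hd)
        simp [h, ih, hb, hne]

theorem findpossible_spec : Claim_equal_findpossible := by
  intro cell _ hpre
  unfold Spec_findpossible
  set xs := cell.flatten with hxs
  set p0 : List Int := [1,2,3,4,5,6,7,8,9] with hp0
  set ds : List Int := xs.filterMap pvDval with hds
  have hp0nd : p0.Nodup := by decide
  have hds_mem : ∀ a ∈ ds, a ∈ p0 := by
    intro a hma
    obtain ⟨d, _, hd⟩ := List.mem_filterMap.1 hma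
    exact pv_dval_mem hd
  have hds_nd : ds.Nodup := by
    rw [List.nodup_iff_count_le_one]
    intro a
    by_cases ha : a ∈ p0
    · rw [hds, pv_count_filterMap ha xs]
      apply hpre
      rw [hp0] at ha
      fin_cases ha <;> decide
    · have hnm : a ∉ ds := fun h => ha (hds_mem a h)
      simp [List.count_eq_zero.2 hnm]
  have hds_iff : ∀ a ∈ p0, (a ∈ ds ↔ PySem.Int.toStr a ∈ xs) := by
    intro a ha
    constructor
    · intro h
      obtain ⟨d, hdx, hd⟩ := List.mem_filterMap.1 h
      rwa [← (pv_dval_eq_some ha d).1 hd]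
    · intro h
      exact List.mem_filterMap.2 ⟨PySem.Int.toStr a, h, (pv_dval_eq_some ha _).2 rfl⟩
  -- ===== B side =====
  have hB : findpossible_alt cell = (ds.foldl pvRemStep (some p0)).getD [] := by
    unfold findpossible_alt
    rw [← List.foldl_flatten, ← hxs, ← hp0]
    have hstep : ∀ (st : Option (List Int)) (d : String),
        (if (["1","2","3","4","5","6","7","8","9"] : List String).contains d then
          st.bind (fun p => (PySem.Int.ofStr? d).bind (fun n => PySem.List.remove? p n))
        else st)
      = (match pvDval d with | some n => pvRemStep st n | none => st) := by
      intro st d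
      by_cases hc : d ∈ (["1","2","3","4","5","6","7","8","9"] : List String)
      · rw [if_pos (by simpa [List.contains_eq_mem] using hc)]
        simp only [List.mem_cons, List.not_mem_nil, or_false] at hc
        rcases hc with rfl|rfl|rfl|rfl|rfl|rfl|rfl|rfl|rfl <;> rfl
      · rw [if_neg (by simpa [List.contains_eq_mem] using hc)]
        simp only [List.mem_cons, List.not_mem_nil, or_false, not_or] at hc
        obtain ⟨n1, n2, n3, n4, n5, n6, n7, n8, n9⟩ := hc
        have hnone : pvDval d = none := by
          unfold pvDval
          rw [if_neg n1, if_neg n2, if_neg n3, if_neg n4, if_neg n5, if_neg n6, if_neg n7,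
              if_neg n8, if_neg n9]
        rw [hnone]
    rw [PySem.List.foldl_congr_mem xs _ _ (some p0) (fun st d _ => hstep st d)]
    rw [pv_foldl_dval xs (some p0), ← hds]
  -- ===== A side =====
  have hA : findpossible cell
      = ((p0.filter (fun n => xs.contains (PySem.Int.toStr n))).foldl pvRemStep (some p0)).getD [] := by
    unfold findpossible
    rw [show PySem.List.pyRange 0 9 1 = [0,1,2,3,4,5,6,7,8] from by decide, ← hp0]
    have hinner : ∀ (st : Option (List Int)), ∀ i ∈ ([0,1,2,3,4,5,6,7,8] : List Int),
        cell.foldl (fun st row => row.foldl (fun st d =>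
            if d == PySem.Int.toStr (i + 1) then st.bind (fun p => PySem.List.remove? p (i + 1)) else st) st) st
          = if xs.contains (PySem.Int.toStr (i + 1)) then pvRemStep st (i + 1) else st := by
      intro st i hi
      rw [← List.foldl_flatten, ← hxs]
      have hcount : xs.count (PySem.Int.toStr (i + 1)) ≤ 1 := by
        apply hpre
        fin_cases hi <;> decide
      exact pv_inner _ _ xs hcount st
    rw [PySem.List.foldl_congr_mem ([0,1,2,3,4,5,6,7,8] : List Int) _ _ (some p0) hinner]
    rw [pv_condA xs ([0,1,2,3,4,5,6,7,8] : List Int) (some p0)]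
    rw [show ([0,1,2,3,4,5,6,7,8] : List Int).map (fun i => i + 1) = ([1,2,3,4,5,6,7,8,9] : List Int) from by decide, ← hp0]
  -- ===== assemble =====
  rw [hA, hB]
  set dsA : List Int := p0.filter (fun n => xs.contains (PySem.Int.toStr n)) with hdsA
  rw [pv_removeChain dsA p0 hp0nd (hp0nd.filter _) (fun n h => (List.mem_filter.1 h).1)]
  rw [pv_removeChain ds p0 hp0nd hds_nd hds_mem]
  congr 2
  apply List.filter_congr
  intro a ha
  have hiff : (a ∈ dsA) ↔ (a ∈ ds) := by
    rw [hdsA, List.mem_filter, hds_iff a ha]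
    simp [ha, List.contains_eq_mem]
  by_cases h1 : a ∈ dsA
  · have h2 : a ∈ ds := hiff.1 h1
    simp [List.contains_eq_mem, h1, h2]
  · have h2 : a ∉ ds := fun h => h1 (hiff.2 h)
    simp [List.contains_eq_mem, h1, h2]
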